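-- pv_equiv track=rewrite | github.com/nishu2402/Cyber-Security-Aegis-IAM-Dashboard | app.py | mitre_tags
-- ===== SOURCE A (Python) =====
-- def mitre_tags(mitre_map: dict, permissions) -> list:
--     """Case-insensitive MITRE mapping. Accepts set/list of permission strings."""
--     tags = []
--     seen = set()
--     for p in sorted({str(x) for x in (permissions or [])}):
--         key = p.lower()
--         if key in mitre_map and key not in seen:
--             t = mitre_map[key]
--             tags.append({
--                 "permission": p,
--                 "technique": t.get("technique", ""),
--                 "id": t.get("id", ""),
--                 "tactic": t.get("tactic", ""),
--                 "note": t.get("note", ""),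
--             })
--             seen.add(key)
--     return tags
-- ===== SOURCE B (Python) =====
-- def mitre_tags(mitre_map: dict, permissions) -> list:
--     """Case-insensitive MITRE mapping. Accepts set/list of permission strings."""
--     # Group first: for each lowercased key, keep the lexicographically smallest
--     # original spelling; then select mapped keys, sort the representatives, emit.
--     best = {}
--     for x in (permissions or []):
--         p = str(x)
--         k = p.lower()
--         if k not in best or p < best[k]:
--             best[k] = p
--     chosen = sorted(p for k, p in best.items() if k in mitre_map)
--     out = []
--     for p in chosen:
--         t = mitre_map[p.lower()]
--         out.append({
--             "permission": p,
--             "technique": t.get("technique", ""),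
--             "id": t.get("id", ""),
--             "tactic": t.get("tactic", ""),
--             "note": t.get("note", ""),
--         })
--     return out
-- ===== Notes on version B (the rewrite author's own statement) =====
-- stated objective: alternative
-- what changed: Replaces A's sorted-scan-with-seen-set by a group-then-sort shape: one pass builds a dict mapping each lowercased key to its lexicographically smallest original spelling, then only the mapped representatives are sorted and emitted.
import Mathlib
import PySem

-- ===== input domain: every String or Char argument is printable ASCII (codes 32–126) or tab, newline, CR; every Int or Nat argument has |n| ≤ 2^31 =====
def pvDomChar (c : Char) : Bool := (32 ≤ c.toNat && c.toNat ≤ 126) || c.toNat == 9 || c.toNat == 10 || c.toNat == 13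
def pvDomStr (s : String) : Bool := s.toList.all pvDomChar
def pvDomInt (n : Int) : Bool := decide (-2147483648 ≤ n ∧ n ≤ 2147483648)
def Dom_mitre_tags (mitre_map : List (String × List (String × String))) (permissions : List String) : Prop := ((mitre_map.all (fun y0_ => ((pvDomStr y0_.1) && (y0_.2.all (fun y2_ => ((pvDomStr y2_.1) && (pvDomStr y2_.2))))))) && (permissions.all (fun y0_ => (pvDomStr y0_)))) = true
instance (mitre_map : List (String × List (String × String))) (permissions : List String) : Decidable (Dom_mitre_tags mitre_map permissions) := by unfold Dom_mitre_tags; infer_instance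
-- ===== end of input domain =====

-- B replaces A's sorted-scan-with-seen-set by a group-then-sort decomposition (objective: alternative, same cost).

-- ===== PORT A =====
-- literal port of A: iterate sorted(set(permissions)) with a seen-set of lowercased keys,
-- appending an entry dict the first time a key that is in mitre_map appears.
-- ('permissions or []' is the identity on a list value; str(x) is the identity on strings.)
def mitre_tags (mitre_map : List (String × List (String × String))) (permissions : List String) : List (List (String × String)) :=
  let M : PySem.Dict String (List (String × String)) := PySem.Dict.mk mitre_map
  let r := (PySem.List.sorted (PySem.Set.ofList permissions) (fun x => x) false).foldl
    (fun (st : List (List (String × String)) × PySem.Set String) p =>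
      let key := PySem.Str.lower p
      if M.contains key && !(PySem.Set.contains st.2 key) then
        let t : PySem.Dict String String := PySem.Dict.mk (M.getD key [])
        (st.1 ++ [[("permission", p), ("technique", t.getD "technique" ""), ("id", t.getD "id" ""),
                   ("tactic", t.getD "tactic" ""), ("note", t.getD "note" "")]], PySem.Set.add st.2 key)
      else st)
    ([], PySem.Set.empty)
  r.1

-- ===== PORT B =====
-- one step of B's grouping loop: keep the lexicographically smallest spelling per lowercased key
def mitre_tags_best_step (d : PySem.Dict String String) (p : String) : PySem.Dict String String :=
  let k := PySem.Str.lower p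
  match d.get? k with
  | none => d.insert k p
  | some q => if p < q then d.insert k p else d

-- literal port of B (Source B): group permissions by lowercased key keeping the min spelling,
-- select the keys present in mitre_map, sort the representatives, then emit the entries.
def mitre_tags_alt (mitre_map : List (String × List (String × String))) (permissions : List String) : List (List (String × String)) :=
  let best := permissions.foldl mitre_tags_best_step PySem.Dict.empty
  let M : PySem.Dict String (List (String × String)) := PySem.Dict.mk mitre_map
  let chosen := PySem.List.sorted ((best.items.filter (fun kp => M.contains kp.1)).map (fun kp => kp.2)) (fun x => x) false
  chosen.map (fun p =>
    let t : PySem.Dict String String := PySem.Dict.mk (M.getD (PySem.Str.lower p) [])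
    [("permission", p), ("technique", t.getD "technique" ""), ("id", t.getD "id" ""),
     ("tactic", t.getD "tactic" ""), ("note", t.getD "note" "")])

-- ===== PRECONDITION & SPEC =====
def Spec_mitre_tags (mitre_map : List (String × List (String × String))) (permissions : List String) (out : List (List (String × String))) : Prop := out = mitre_tags_alt mitre_map permissions
instance (mitre_map : List (String × List (String × String))) (permissions : List String) (out : List (List (String × String))) : Decidable (Spec_mitre_tags mitre_map permissions out) := by unfold Spec_mitre_tags; infer_instance

-- ===== CLAIM (what is proved, stated in full; the proofs are below) =====
def Claim_equal_mitre_tags : Prop := ∀ (mitre_map : List (String × List (String × String))) (permissions : List String), Dom_mitre_tags mitre_map permissions → Spec_mitre_tags mitre_map permissions (mitre_tags mitre_map permissions)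

-- ===== LEMMAS AND PROOFS =====

-- the entry built for permission p (the same dict literal both Pythons build)
def pvEnt (M : PySem.Dict String (List (String × String))) (p : String) : List (String × String) :=
  let t : PySem.Dict String String := PySem.Dict.mk (M.getD (PySem.Str.lower p) [])
  [("permission", p), ("technique", t.getD "technique" ""), ("id", t.getD "id" ""),
   ("tactic", t.getD "tactic" ""), ("note", t.getD "note" "")]

-- the list of permissions A keeps, as a recursion (fold state abstracted away)
def pvScan (M : PySem.Dict String (List (String × String))) : List String → PySem.Set String → List String
  | [], _ => []
  | p :: rest, s =>
    if M.contains (PySem.Str.lower p) && !(PySem.Set.contains s (PySem.Str.lower p)) then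
      p :: pvScan M rest (PySem.Set.add s (PySem.Str.lower p))
    else pvScan M rest s

theorem pvScan_sublist (M : PySem.Dict String (List (String × String))) :
    ∀ (xs : List String) (s : PySem.Set String), (pvScan M xs s).Sublist xs := by
  intro xs
  induction xs with
  | nil => intro s; simp [pvScan]
  | cons p rest ih =>
    intro s
    simp only [pvScan]
    split
    · exact (ih _).cons₂ p
    · exact (ih s).cons p

theorem pv_foldA_eq_scan (M : PySem.Dict String (List (String × String))) :
    ∀ (xs : List String) (acc : List (List (String × String))) (s : PySem.Set String),
      (xs.foldl (fun (st : List (List (String × String)) × PySem.Set String) p =>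
        let key := PySem.Str.lower p
        if M.contains key && !(PySem.Set.contains st.2 key) then
          let t : PySem.Dict String String := PySem.Dict.mk (M.getD key [])
          (st.1 ++ [[("permission", p), ("technique", t.getD "technique" ""), ("id", t.getD "id" ""),
                     ("tactic", t.getD "tactic" ""), ("note", t.getD "note" "")]], PySem.Set.add st.2 key)
        else st) (acc, s)).1 = acc ++ (pvScan M xs s).map (pvEnt M) := by
  intro xs
  induction xs with
  | nil => intro acc s; simp [pvScan]
  | cons p rest ih =>
    intro acc s
    simp only [List.foldl_cons, pvScan]
    split
    · rw [ih]; simp [pvEnt]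
    · rw [ih]

-- membership in A's kept list, over a strictly sorted list
theorem pv_mem_scan (M : PySem.Dict String (List (String × String))) (p : String) :
    ∀ (xs : List String) (s : PySem.Set String), xs.Pairwise (· < ·) →
      (p ∈ pvScan M xs s ↔
        p ∈ xs ∧ M.contains (PySem.Str.lower p) = true ∧ PySem.Str.lower p ∉ s ∧
          ∀ q ∈ xs, PySem.Str.lower q = PySem.Str.lower p → p ≤ q) := by
  intro xs
  induction xs with
  | nil => intro s _; simp [pvScan]
  | cons x rest ih =>
    intro s hpw
    rcases List.pairwise_cons.mp hpw with ⟨hx, hrest⟩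
    simp only [pvScan]
    by_cases hc : M.contains (PySem.Str.lower x) = true
    · by_cases hs : PySem.Str.lower x ∈ s
      · rw [if_neg (by simp [hc, hs])]
        rw [ih s hrest]
        constructor
        · rintro ⟨hp, hcont, hns, hmin⟩
          refine ⟨List.mem_cons_of_mem _ hp, hcont, hns, ?_⟩
          intro q hq hlow
          rcases List.mem_cons.mp hq with rfl | hq'
          · exact absurd (hlow ▸ hs) hns
          · exact hmin q hq' hlow
        · rintro ⟨hp, hcont, hns, hmin⟩
          rcases List.mem_cons.mp hp with rfl | hp'
          · exact absurd hs hns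
          · exact ⟨hp', hcont, hns, fun q hq hlow => hmin q (List.mem_cons_of_mem _ hq) hlow⟩
      · rw [if_pos (by simp [hc, hs])]
        rw [List.mem_cons, ih (PySem.Set.add s (PySem.Str.lower x)) hrest]
        constructor
        · rintro (rfl | ⟨hp, hcont, hns, hmin⟩)
          · refine ⟨List.mem_cons_self, hc, hs, ?_⟩
            intro q hq _
            rcases List.mem_cons.mp hq with rfl | hq'
            · exact le_refl _
            · exact (hx q hq').le
          · have hns' : PySem.Str.lower p ∉ s ∧ PySem.Str.lower p ≠ PySem.Str.lower x := by
              constructor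
              · exact fun h => hns ((PySem.Set.mem_add _ _ _).mpr (Or.inl h))
              · exact fun h => hns ((PySem.Set.mem_add _ _ _).mpr (Or.inr h))
            refine ⟨List.mem_cons_of_mem _ hp, hcont, hns'.1, ?_⟩
            intro q hq hlow
            rcases List.mem_cons.mp hq with rfl | hq'
            · exact absurd hlow hns'.2.symm
            · exact hmin q hq' hlow
        · rintro ⟨hp, hcont, hns, hmin⟩
          rcases List.mem_cons.mp hp with rfl | hp'
          · exact Or.inl rfl
          · refine Or.inr ⟨hp', hcont, ?_, fun q hq hlow => hmin q (List.mem_cons_of_mem _ hq) hlow⟩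
            intro hmem
            rcases (PySem.Set.mem_add _ _ _).mp hmem with h | h
            · exact hns h
            · exact absurd (hmin x List.mem_cons_self h.symm) (not_le.mpr (hx p hp'))
    · rw [if_neg (by simp [hc])]
      rw [ih s hrest]
      constructor
      · rintro ⟨hp, hcont, hns, hmin⟩
        refine ⟨List.mem_cons_of_mem _ hp, hcont, hns, ?_⟩
        intro q hq hlow
        rcases List.mem_cons.mp hq with rfl | hq'
        · exact absurd (hlow ▸ hcont) hc
        · exact hmin q hq' hlow
      · rintro ⟨hp, hcont, hns, hmin⟩
        rcases List.mem_cons.mp hp with rfl | hp'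
        · exact absurd hcont hc
        · exact ⟨hp', hcont, hns, fun q hq hlow => hmin q (List.mem_cons_of_mem _ hq) hlow⟩

-- B's grouping fold: what its lookups are
theorem pv_best_step_cases (d : PySem.Dict String String) (p : String) :
    mitre_tags_best_step d p = d ∨ mitre_tags_best_step d p = d.insert (PySem.Str.lower p) p := by
  unfold mitre_tags_best_step
  cases hd : d.get? (PySem.Str.lower p) with
  | none => simp [hd]
  | some q =>
    simp only [hd]
    split
    · simp
    · simp

theorem pv_best_step_get_self (d : PySem.Dict String String) (p : String) :
    ∃ m, (mitre_tags_best_step d p).get? (PySem.Str.lower p) = some m ∧ m ≤ p ∧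
      (m = p ∨ d.get? (PySem.Str.lower p) = some m) ∧
      ∀ q, d.get? (PySem.Str.lower p) = some q → m ≤ q := by
  unfold mitre_tags_best_step
  cases hd : d.get? (PySem.Str.lower p) with
  | none =>
    simp only [hd]
    exact ⟨p, PySem.Dict.get?_insert_self _ _ _, le_refl p, Or.inl rfl,
      fun q hq => by cases hq⟩
  | some q =>
    simp only [hd]
    by_cases hlt : p < q
    · rw [if_pos hlt]
      exact ⟨p, PySem.Dict.get?_insert_self _ _ _, le_refl p, Or.inl rfl,
        fun r hr => hlt.le.trans (le_of_eq (Option.some.inj hr))⟩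
    · rw [if_neg hlt]
      exact ⟨q, hd, not_lt.mp hlt, Or.inr rfl,
        fun r hr => le_of_eq (Option.some.inj hr)⟩

theorem pv_best_step_get_ne (d : PySem.Dict String String) (p k : String)
    (h : ¬ PySem.Str.lower p = k) : (mitre_tags_best_step d p).get? k = d.get? k := by
  rcases pv_best_step_cases d p with he | he <;> rw [he]
  exact PySem.Dict.get?_insert_of_ne _ _ (fun hk => h hk.symm)

theorem pv_best_get (k : String) (v : String) :
    ∀ (xs : List String) (d : PySem.Dict String String),
      ((xs.foldl mitre_tags_best_step d).get? k = some v ↔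
        (d.get? k = some v ∨ (v ∈ xs ∧ PySem.Str.lower v = k)) ∧
        (∀ q ∈ xs, PySem.Str.lower q = k → v ≤ q) ∧
        (∀ q, d.get? k = some q → v ≤ q)) := by
  intro xs
  induction xs with
  | nil =>
    intro d
    rw [List.foldl_nil]
    constructor
    · intro h
      refine ⟨Or.inl h, by simp, fun q hq => ?_⟩
      rw [h] at hq; exact le_of_eq (Option.some.inj hq)
    · rintro ⟨h | ⟨hv, -⟩, -, -⟩
      · exact h
      · simp at hv
  | cons x rest ih =>
    intro d
    rw [List.foldl_cons, ih (mitre_tags_best_step d x)]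
    by_cases hk : PySem.Str.lower x = k
    · obtain ⟨m, hm, hmx, hmor, hmle⟩ := pv_best_step_get_self d x
      rw [hk] at hm hmor hmle
      rw [hm]
      constructor
      · rintro ⟨hor, hminrest, hled'⟩
        have hvm : v ≤ m := hled' m rfl
        refine ⟨?_, ?_, ?_⟩
        · rcases hor with h | ⟨hv, hl⟩
          · have hveq : v = m := Option.some.inj h.symm
            rcases hmor with hmx' | hd
            · exact Or.inr ⟨by rw [hveq, hmx']; exact List.mem_cons_self, by rw [hveq, hmx']; exact hk⟩
            · exact Or.inl (by rw [hveq]; exact hd)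
          · exact Or.inr ⟨List.mem_cons_of_mem _ hv, hl⟩
        · intro q hq hl
          rcases List.mem_cons.mp hq with rfl | hq'
          · exact hvm.trans hmx
          · exact hminrest q hq' hl
        · intro q hq
          exact hvm.trans (hmle q hq)
      · rintro ⟨hor, hmin, hled⟩
        have hvm : v ≤ m := by
          rcases hmor with hmx' | hd
          · rw [hmx']; exact hmin x (List.mem_cons_self) hk
          · exact hled m hd
        refine ⟨?_, fun q hq hl => hmin q (List.mem_cons_of_mem _ hq) hl, fun q hq => ?_⟩
        · rcases hor with hd | ⟨hv, hl⟩
          · exact Or.inl (by rw [le_antisymm hvm (hmle v hd)])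
          · rcases List.mem_cons.mp hv with rfl | hv'
            · exact Or.inl (by rw [le_antisymm hvm hmx])
            · exact Or.inr ⟨hv', hl⟩
        · exact hvm.trans (le_of_eq (Option.some.inj hq))
    · rw [pv_best_step_get_ne d x k hk]
      constructor
      · rintro ⟨hor, hmin, hled⟩
        refine ⟨hor.imp id (fun h => ⟨List.mem_cons_of_mem _ h.1, h.2⟩), fun q hq hl => ?_, hled⟩
        rcases List.mem_cons.mp hq with rfl | hq'
        · exact absurd hl hk
        · exact hmin q hq' hl
      · rintro ⟨hor, hmin, hled⟩
        refine ⟨?_, fun q hq hl => hmin q (List.mem_cons_of_mem _ hq) hl, hled⟩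
        rcases hor with hd | ⟨hv, hl⟩
        · exact Or.inl hd
        · rcases List.mem_cons.mp hv with rfl | hv'
          · exact absurd hl hk
          · exact Or.inr ⟨hv', hl⟩

theorem pv_best_keys_nodup :
    ∀ (xs : List String) (d : PySem.Dict String String), d.keys.Nodup →
      (xs.foldl mitre_tags_best_step d).keys.Nodup := by
  intro xs
  induction xs with
  | nil => intro d h; exact h
  | cons p rest ih =>
    intro d h
    refine ih _ ?_
    rcases pv_best_step_cases d p with he | he
    · rw [he]; exact h
    · rw [he]; exact PySem.Dict.nodup_keys_insert _ _ _ h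

theorem pv_best_key_inv :
    ∀ (xs : List String) (d : PySem.Dict String String),
      (∀ kp ∈ d.items, PySem.Str.lower kp.2 = kp.1) →
      ∀ kp ∈ (xs.foldl mitre_tags_best_step d).items, PySem.Str.lower kp.2 = kp.1 := by
  intro xs
  induction xs with
  | nil => intro d h; exact h
  | cons p rest ih =>
    intro d h
    refine ih _ ?_
    rcases pv_best_step_cases d p with he | he <;> rw [he]
    · exact h
    · intro kp hkp
      rcases (PySem.Dict.mem_items_insert _ _ _ _).mp hkp with rfl | ⟨hmem, -⟩
      · rfl
      · exact h kp hmem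

theorem pv_mem_S (perms : List String) (r : String) :
    r ∈ PySem.List.sorted (PySem.Set.ofList perms) (fun x => x) false ↔ r ∈ perms := by
  rw [PySem.List.mem_sorted]
  exact PySem.Set.mem_ofList _ _

-- ===== VERDICT (by name: the statement is the Claim_ definition above) =====
theorem mitre_tags_spec : Claim_equal_mitre_tags := by
  intro mm perms _
  unfold Spec_mitre_tags
  have hA : mitre_tags mm perms =
      (pvScan (PySem.Dict.mk mm) (PySem.List.sorted (PySem.Set.ofList perms) (fun x => x) false)
        PySem.Set.empty).map (pvEnt (PySem.Dict.mk mm)) := by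
    simp only [mitre_tags]
    rw [pv_foldA_eq_scan]
    simp
  have hB : mitre_tags_alt mm perms =
      (PySem.List.sorted (((perms.foldl mitre_tags_best_step PySem.Dict.empty).items.filter
          (fun kp => (PySem.Dict.mk mm).contains kp.1)).map (fun kp => kp.2)) (fun x => x) false).map
        (pvEnt (PySem.Dict.mk mm)) := by
    simp only [mitre_tags_alt]
    rfl
  have hndk := pv_best_keys_nodup perms PySem.Dict.empty PySem.Dict.nodup_keys_empty
  have hinv := pv_best_key_inv perms PySem.Dict.empty (by intro kp hkp; simp [PySem.Dict.empty] at hkp)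
  have hpwS : (PySem.List.sorted (PySem.Set.ofList perms) (fun x => x) false).Pairwise (· < ·) :=
    PySem.List.sorted_ofList_pairwise_lt perms
  have hLpw : (pvScan (PySem.Dict.mk mm) (PySem.List.sorted (PySem.Set.ofList perms) (fun x => x) false)
      PySem.Set.empty).Pairwise (· < ·) :=
    List.Pairwise.sublist (pvScan_sublist _ _ _) hpwS
  have hLnd := hLpw.imp (fun h => ne_of_lt h)
  have hmemL : ∀ p, p ∈ pvScan (PySem.Dict.mk mm)
      (PySem.List.sorted (PySem.Set.ofList perms) (fun x => x) false) PySem.Set.empty ↔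
      (p ∈ perms ∧ (PySem.Dict.mk mm).contains (PySem.Str.lower p) = true ∧
        ∀ q ∈ perms, PySem.Str.lower q = PySem.Str.lower p → p ≤ q) := by
    intro p
    rw [pv_mem_scan _ _ _ _ hpwS]
    constructor
    · rintro ⟨hp, hc, -, hmin⟩
      exact ⟨(pv_mem_S perms p).mp hp, hc, fun q hq hl => hmin q ((pv_mem_S perms q).mpr hq) hl⟩
    · rintro ⟨hp, hc, hmin⟩
      exact ⟨(pv_mem_S perms p).mpr hp, hc, by simp [PySem.Set.empty],
        fun q hq hl => hmin q ((pv_mem_S perms q).mp hq) hl⟩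
  have hmemV : ∀ p, p ∈ ((perms.foldl mitre_tags_best_step PySem.Dict.empty).items.filter
      (fun kp => (PySem.Dict.mk mm).contains kp.1)).map (fun kp => kp.2) ↔
      (p ∈ perms ∧ (PySem.Dict.mk mm).contains (PySem.Str.lower p) = true ∧
        ∀ q ∈ perms, PySem.Str.lower q = PySem.Str.lower p → p ≤ q) := by
    intro p
    simp only [List.mem_map, List.mem_filter]
    constructor
    · rintro ⟨⟨k0, v0⟩, ⟨hitem, hcont⟩, rfl⟩
      have hk : PySem.Str.lower v0 = k0 := hinv (k0, v0) hitem
      have hget := PySem.Dict.get?_of_mem_items _ hitem hndk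
      rw [pv_best_get] at hget
      rcases hget with ⟨hor, hmin, -⟩
      have hp : v0 ∈ perms := by
        rcases hor with h | h
        · rw [PySem.Dict.get?_empty] at h; cases h
        · exact h.1
      exact ⟨hp, by rw [hk]; exact hcont, fun q hq hl => hmin q hq (by rw [hl, hk])⟩
    · rintro ⟨hp, hc, hmin⟩
      refine ⟨(PySem.Str.lower p, p), ⟨?_, hc⟩, rfl⟩
      apply PySem.Dict.mem_items_of_get?_eq_some
      rw [pv_best_get]
      exact ⟨Or.inr ⟨hp, rfl⟩, fun q hq hl => hmin q hq hl,
        fun q hq => by rw [PySem.Dict.get?_empty] at hq; cases hq⟩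
  have hVnd : (((perms.foldl mitre_tags_best_step PySem.Dict.empty).items.filter
      (fun kp => (PySem.Dict.mk mm).contains kp.1)).map (fun kp => kp.2)).Nodup := by
    have hitems : (perms.foldl mitre_tags_best_step PySem.Dict.empty).items.Nodup := by
      have h := hndk
      simp only [PySem.Dict.keys] at h
      exact List.Nodup.of_map _ h
    refine List.Nodup.map_on ?_ (hitems.filter _)
    intro a ha b hb hab
    have hia := hinv a (List.mem_of_mem_filter ha)
    have hib := hinv b (List.mem_of_mem_filter hb)
    exact Prod.ext_iff.mpr ⟨by rw [← hia, ← hib, hab], hab⟩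
  have hperm := (List.perm_ext_iff_of_nodup hLnd hVnd).mpr
    (fun a => (hmemL a).trans (hmemV a).symm)
  rw [hA, hB]
  exact congrArg _ (PySem.List.sorted_eq_of_perm_of_pairwise_lt _ _ _ hperm hLpw).symm
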